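-- pv_equiv track=rewrite | github.com/anaelDelorme/foot_equipe | distribution.py | calculate_optimal_distribution
-- ===== SOURCE A (Python) =====
-- from typing import List
--
-- def calculate_optimal_distribution(
--     total_players: int, num_teams: int, num_subteams: int
-- ) -> List[List[int]]:
--     avg_players_per_team = total_players / num_teams
--     team_sizes = []
--     remaining_players = total_players
--     for i in range(num_teams):
--         if i == num_teams - 1:
--             team_sizes.append(remaining_players)
--         else:
--             size = round(avg_players_per_team)
--             team_sizes.append(size)
--             remaining_players -= size
--
--     subteam_distribution = []
--     for team_size in team_sizes:
--         avg_players_per_subteam = team_size / num_subteams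
--         subteam_sizes = []
--         remaining_team_players = team_size
--
--         for j in range(num_subteams):
--             if j == num_subteams - 1:
--                 subteam_sizes.append(remaining_team_players)
--             else:
--                 size = round(avg_players_per_subteam)
--                 subteam_sizes.append(size)
--                 remaining_team_players -= size
--
--         subteam_distribution.append(subteam_sizes)
--
--     return subteam_distribution
-- ===== SOURCE B (Python) =====
-- def calculate_optimal_distribution(total_players, num_teams, num_subteams):
--     def cuts(total, n):
--         # cumulative boundary positions: i*r for each slot start, total at the end
--         r = round(total / n)
--         return [i * r for i in range(n)] + [total]
--
--     def diffs(bounds):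
--         return [b - a for a, b in zip(bounds, bounds[1:])]
--
--     return [diffs(cuts(t, num_subteams)) for t in diffs(cuts(total_players, num_teams))]
-- ===== Notes on version B (the rewrite author's own statement) =====
-- stated objective: alternative
-- what changed: B replaces A's subtract-and-accumulate loops (a running 'remaining' counter, round() re-evaluated each iteration) by a boundary/differencing method: it computes the cumulative cut positions i*round(total/n) plus a final boundary at total, and the sizes are the adjacent differences of that boundary list, applied at both levels.
import Mathlib
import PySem

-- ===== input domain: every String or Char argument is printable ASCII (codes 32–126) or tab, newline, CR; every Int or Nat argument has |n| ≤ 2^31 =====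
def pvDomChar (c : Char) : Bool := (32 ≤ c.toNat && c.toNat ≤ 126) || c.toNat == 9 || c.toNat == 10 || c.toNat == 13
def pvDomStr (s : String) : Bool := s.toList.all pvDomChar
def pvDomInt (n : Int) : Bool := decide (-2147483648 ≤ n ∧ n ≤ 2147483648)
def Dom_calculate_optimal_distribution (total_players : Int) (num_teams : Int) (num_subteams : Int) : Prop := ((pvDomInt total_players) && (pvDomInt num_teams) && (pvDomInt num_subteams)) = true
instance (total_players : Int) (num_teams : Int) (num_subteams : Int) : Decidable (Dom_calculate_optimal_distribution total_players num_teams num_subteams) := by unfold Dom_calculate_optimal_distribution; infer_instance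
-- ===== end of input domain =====

-- B computes cumulative cut positions and takes adjacent differences (boundary/differencing
-- method) instead of A's subtract-and-accumulate loops (objective: alternative).
-- Return-value equivalence on Pre_ is proved below.


-- ===== PORT A =====
-- Hand port of the Python builtin expression round(a / b) on int arguments (both Pythons use it):
-- float true division followed by round-half-to-even. Computed here as exact half-to-even rounding
-- of the rational a/b; on the integer ranges these ports reach under Dom the float result coincides
-- with the exact rational rounding. Returns 0 for b = 0, where Python raises ZeroDivisionError
-- (excluded by Pre_).
def pyRoundDiv (a b : Int) : Int :=
  if b = 0 then 0
  else
    let a' := if b < 0 then -a else a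
    let b' := if b < 0 then -b else b
    let q := PySem.Int.floordiv a' b'
    let r2 := 2 * (a' - q * b')
    if r2 < b' then q else if b' < r2 then q + 1 else if q % 2 = 0 then q else q + 1

def calculate_optimal_distribution (total_players : Int) (num_teams : Int) (num_subteams : Int) : List (List Int) :=
  -- avg_players_per_team = total_players / num_teams; round(avg_players_per_team) = pyRoundDiv total_players num_teams
  let team_state :=
    (PySem.List.pyRange 0 num_teams 1).foldl
      (fun (s : List Int × Int) i =>
        if i = num_teams - 1 then (s.1 ++ [s.2], s.2)
        else
          let size := pyRoundDiv total_players num_teams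
          (s.1 ++ [size], s.2 - size))
      ([], total_players)
  let team_sizes := team_state.1
  team_sizes.foldl
    (fun (dist : List (List Int)) team_size =>
      -- avg_players_per_subteam = team_size / num_subteams
      let sub_state :=
        (PySem.List.pyRange 0 num_subteams 1).foldl
          (fun (s : List Int × Int) j =>
            if j = num_subteams - 1 then (s.1 ++ [s.2], s.2)
            else
              let size := pyRoundDiv team_size num_subteams
              (s.1 ++ [size], s.2 - size))
          ([], team_size)
      dist ++ [sub_state.1])
    []

-- ===== PORT B =====
-- helper cuts(total, n) of Source B: cumulative boundary positions
def pvCuts (total n : Int) : List Int :=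
  let r := pyRoundDiv total n
  (PySem.List.pyRange 0 n 1).map (fun i => i * r) ++ [total]

-- helper diffs(bounds) of Source B: [b - a for a, b in zip(bounds, bounds[1:])]
-- (bounds[1:] on a list is exactly List.drop 1)
def pvDiffs (bounds : List Int) : List Int :=
  (bounds.zip (bounds.drop 1)).map (fun p => p.2 - p.1)

def calculate_optimal_distribution_alt (total_players : Int) (num_teams : Int) (num_subteams : Int) : List (List Int) :=
  (pvDiffs (pvCuts total_players num_teams)).map (fun t => pvDiffs (pvCuts t num_subteams))

-- ===== PRECONDITION & SPEC =====
-- Pre_ excludes exactly the inputs where Python A raises ZeroDivisionError: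
-- num_teams = 0, or num_subteams = 0 while the team list is nonempty (num_teams > 0).
def Pre_calculate_optimal_distribution (total_players : Int) (num_teams : Int) (num_subteams : Int) : Prop :=
  num_teams ≠ 0 ∧ (num_subteams ≠ 0 ∨ num_teams < 0)
instance (total_players : Int) (num_teams : Int) (num_subteams : Int) : Decidable (Pre_calculate_optimal_distribution total_players num_teams num_subteams) := by unfold Pre_calculate_optimal_distribution; infer_instance
def pvWitness_calculate_optimal_distribution : Int × Int × Int := (10, 3, 2)

def Spec_calculate_optimal_distribution (total_players : Int) (num_teams : Int) (num_subteams : Int) (out : List (List Int)) : Prop := out = calculate_optimal_distribution_alt total_players num_teams num_subteams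
instance (total_players : Int) (num_teams : Int) (num_subteams : Int) (out : List (List Int)) : Decidable (Spec_calculate_optimal_distribution total_players num_teams num_subteams out) := by unfold Spec_calculate_optimal_distribution; infer_instance

-- ===== CLAIM (what is proved, stated in full; the proofs are below) =====
def Claim_equal_calculate_optimal_distribution : Prop := ∀ (total_players : Int) (num_teams : Int) (num_subteams : Int), Dom_calculate_optimal_distribution total_players num_teams num_subteams → Pre_calculate_optimal_distribution total_players num_teams num_subteams → Spec_calculate_optimal_distribution total_players num_teams num_subteams (calculate_optimal_distribution total_players num_teams num_subteams)

-- ===== LEMMAS AND PROOFS =====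

-- Invariant of A's subtract-and-accumulate loop over range(a, n): starting from accumulator acc
-- and remaining count rem, it produces acc ++ the closed-form list (r for each non-last slot,
-- rem minus the r's already handed out for the last slot).
theorem pvLoop_eq (n r : Int) : ∀ (k : Nat) (a : Int) (acc : List Int) (rem : Int),
    (n - a).toNat = k →
    ((PySem.List.pyRange a n 1).foldl
      (fun (s : List Int × Int) i =>
        if i = n - 1 then (s.1 ++ [s.2], s.2) else (s.1 ++ [r], s.2 - r))
      (acc, rem)).1
      = acc ++ (PySem.List.pyRange a n 1).map
          (fun i => if i = n - 1 then rem - (n - 1 - a) * r else r) := by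
  intro k
  induction k with
  | zero =>
    intro a acc rem hk
    have hna : n ≤ a := by omega
    rw [PySem.List.pyRange_one_eq_nil hna]
    simp
  | succ k ih =>
    intro a acc rem hk
    have han : a < n := by omega
    rw [PySem.List.pyRange_one_cons han]
    by_cases hlast : a = n - 1
    · have : n ≤ a + 1 := by omega
      rw [List.foldl_cons, List.map_cons, PySem.List.pyRange_one_eq_nil this]
      simp [hlast]
    · rw [List.foldl_cons, List.map_cons]
      simp only [if_neg hlast]
      rw [ih (a + 1) (acc ++ [r]) (rem - r) (by omega)]
      rw [List.append_assoc, List.singleton_append]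
      congr 2
      refine List.map_congr_left ?_
      intro i _
      by_cases hi : i = n - 1
      · simp only [hi, if_pos]
        ring
      · simp [hi]

-- diffs of a cons-cons list peels one adjacent difference.
theorem pvDiffs_cons (x y : Int) (ys : List Int) :
    pvDiffs (x :: y :: ys) = (y - x) :: pvDiffs (y :: ys) := by
  simp [pvDiffs]

-- B's boundary differences equal the closed-form per-slot list, for any range start a.
theorem pvDiffs_cuts_eq (n r total : Int) : ∀ (k : Nat) (a : Int),
    (n - a).toNat = k →
    pvDiffs ((PySem.List.pyRange a n 1).map (fun i => i * r) ++ [total])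
      = (PySem.List.pyRange a n 1).map
          (fun i => if i = n - 1 then total - (n - 1) * r else r) := by
  intro k
  induction k with
  | zero =>
    intro a hk
    have hna : n ≤ a := by omega
    rw [PySem.List.pyRange_one_eq_nil hna]
    simp [pvDiffs]
  | succ k ih =>
    intro a hk
    have han : a < n := by omega
    rw [PySem.List.pyRange_one_cons han]
    by_cases hlast : a = n - 1
    · have : n ≤ a + 1 := by omega
      rw [PySem.List.pyRange_one_eq_nil this]
      simp only [List.map_cons, List.map_nil, List.singleton_append]
      rw [pvDiffs_cons]
      simp [pvDiffs, hlast]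
    · have h1 : a + 1 < n := by omega
      rw [List.map_cons, List.cons_append, PySem.List.pyRange_one_cons h1,
        List.map_cons, List.cons_append, pvDiffs_cons]
      have hfold : (a + 1) * r :: (List.map (fun i => i * r) (PySem.List.pyRange (a + 1 + 1) n 1) ++ [total])
          = List.map (fun i => i * r) (PySem.List.pyRange (a + 1) n 1) ++ [total] := by
        rw [PySem.List.pyRange_one_cons h1]; simp
      rw [hfold, ih (a + 1) (by omega), ← PySem.List.pyRange_one_cons h1]
      simp only [List.map_cons, if_neg hlast]
      congr 1
      ring
  
-- A's one-level loop (from its real start state) equals B's diffs-of-cuts split.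
theorem pvLoop_eq_cuts (total n : Int) :
    ((PySem.List.pyRange 0 n 1).foldl
      (fun (s : List Int × Int) i =>
        if i = n - 1 then (s.1 ++ [s.2], s.2)
        else (s.1 ++ [pyRoundDiv total n], s.2 - pyRoundDiv total n))
      ([], total)).1 = pvDiffs (pvCuts total n) := by
  have hA := pvLoop_eq n (pyRoundDiv total n) (n - 0).toNat 0 [] total rfl
  have hB := pvDiffs_cuts_eq n (pyRoundDiv total n) total (n - 0).toNat 0 rfl
  rw [pvCuts, hB, hA]
  simp

-- ===== VERDICT (by name: the statement is the Claim_ definition above) =====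
theorem calculate_optimal_distribution_spec : Claim_equal_calculate_optimal_distribution := by
  intro t n m _ _
  show calculate_optimal_distribution t n m = calculate_optimal_distribution_alt t n m
  unfold calculate_optimal_distribution calculate_optimal_distribution_alt
  dsimp only
  rw [pvLoop_eq_cuts t n]
  rw [PySem.List.foldl_append_singleton_eq_map]
  simp only [List.nil_append]
  apply List.map_congr_left
  intro s _
  exact pvLoop_eq_cuts s m
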